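-- pv_equiv track=rewrite | github.com/jbsam2/algo_problem | programmers/쿠키구입.py | solution
-- ===== SOURCE A (Python) =====
-- def solution(cookie):
--     answer = 0;n=len(cookie)-1
--     for i in range(n):
--         s1_val=cookie[i];s1_idx=i
--         s2_val=cookie[i+1];s2_idx=i+1
--         while 1:
--             if s1_val==s2_val and s1_val>answer:answer=s1_val
--             if s1_idx>0 and s1_val<=s2_val:s1_idx-=1;s1_val+=cookie[s1_idx]
--             elif s2_idx<n and s1_val>=s2_val:s2_idx+=1;s2_val+=cookie[s2_idx]
--             else:break
--     return answer
-- ===== SOURCE B (Python) =====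
-- def solution(cookie):
--     n = len(cookie)
--     best = 0
--     for i in range(n - 1):
--         left = set()
--         s = 0
--         for c in reversed(cookie[:i + 1]):
--             s += c
--             left.add(s)
--         t = 0
--         for c in cookie[i + 1:]:
--             t += c
--             if t in left and t > best:
--                 best = t
--     return best
-- ===== Notes on version B (the rewrite author's own statement) =====
-- stated objective: alternative
-- what changed: Replaces the adaptive two-pointer walk per boundary with a direct enumeration: build the set of all left-segment sums at each boundary, then scan right-segment sums and record every sum found in the set.
-- outside the precondition, e.g. on solution([4, 5, -1, -4, 2]): A returns 0, B returns 4
import Mathlib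
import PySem

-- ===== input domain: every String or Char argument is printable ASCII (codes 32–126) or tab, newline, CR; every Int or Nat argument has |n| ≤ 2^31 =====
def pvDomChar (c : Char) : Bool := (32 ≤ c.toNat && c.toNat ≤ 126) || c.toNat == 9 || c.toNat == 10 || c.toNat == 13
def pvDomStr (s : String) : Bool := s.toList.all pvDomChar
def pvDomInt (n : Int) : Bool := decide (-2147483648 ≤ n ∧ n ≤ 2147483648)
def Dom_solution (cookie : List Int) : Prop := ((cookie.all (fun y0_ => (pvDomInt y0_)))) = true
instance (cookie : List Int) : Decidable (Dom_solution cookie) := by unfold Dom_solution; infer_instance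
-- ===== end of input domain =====

-- B replaces A's adaptive per-boundary two-pointer walk by a direct enumeration (set of all
-- left-segment sums, then a scan of right-segment sums); equivalence is proved on lists of
-- non-negative values, the problem's natural domain of cookie counts.


-- ===== PORT A =====
-- the 'while 1' loop of A; answer is updated before the pointer moves, exactly as in A
def solWalk (cookie : List Int) (n s1i s1v s2i s2v answer : Int) : Int :=
  if _h1 : s1i > 0 ∧ s1v ≤ s2v then
    solWalk cookie n (s1i - 1) (s1v + PySem.List.pyGetD cookie (s1i - 1) 0) s2i s2v
      (if s1v = s2v ∧ s1v > answer then s1v else answer)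
  else if _h2 : s2i < n ∧ s1v ≥ s2v then
    solWalk cookie n s1i s1v (s2i + 1) (s2v + PySem.List.pyGetD cookie (s2i + 1) 0)
      (if s1v = s2v ∧ s1v > answer then s1v else answer)
  else (if s1v = s2v ∧ s1v > answer then s1v else answer)
termination_by (s1i.toNat + (n - s2i).toNat)
decreasing_by
  · omega
  · omega

def solution (cookie : List Int) : Int :=
  let n : Int := (cookie.length : Int) - 1
  (PySem.List.pyRange 0 n 1).foldl (fun answer i =>
    solWalk cookie n i (PySem.List.pyGetD cookie i 0) (i + 1)
      (PySem.List.pyGetD cookie (i + 1) 0) answer) 0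

-- ===== PORT B =====
def solution_alt (cookie : List Int) : Int :=
  let n : Int := (cookie.length : Int)
  (PySem.List.pyRange 0 (n - 1) 1).foldl (fun best i =>
    let left : PySem.Set Int :=
      ((PySem.List.slice cookie none (some (i + 1))).reverse.foldl
        (fun (p : Int × PySem.Set Int) c => (p.1 + c, PySem.Set.add p.2 (p.1 + c)))
        (0, PySem.Set.empty)).2
    ((PySem.List.slice cookie (some (i + 1)) none).foldl
        (fun (p : Int × Int) c =>
          (p.1 + c, if PySem.Set.contains left (p.1 + c) ∧ p.1 + c > p.2 then p.1 + c else p.2))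
        (0, best)).2) 0

-- ===== PRECONDITION & SPEC =====
-- Pre_ admits the problem's natural domain (non-negative cookie counts) together with the
-- degenerate cases (length ≤ 2, or no positive entry) where the programs trivially agree;
-- it excludes mixed-sign lists of length ≥ 3, on which A's two-pointer walk loses sum
-- monotonicity and can miss an equal pair that B's exhaustive enumeration finds.
def Pre_solution (cookie : List Int) : Prop :=
  cookie.length ≤ 2 ∨ (∀ x ∈ cookie, 0 ≤ x) ∨ (∀ x ∈ cookie, x ≤ 0)
instance (cookie : List Int) : Decidable (Pre_solution cookie) := by unfold Pre_solution; infer_instance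
def pvWitness_solution : List Int := [1, 2, 4, 6, 1]
def Spec_solution (cookie : List Int) (out : Int) : Prop := out = solution_alt cookie
instance (cookie : List Int) (out : Int) : Decidable (Spec_solution cookie out) := by unfold Spec_solution; infer_instance

-- ===== CLAIM (what is proved, stated in full; the proofs are below) =====
def Claim_equal_solution : Prop := ∀ (cookie : List Int), Dom_solution cookie → Pre_solution cookie → Spec_solution cookie (solution cookie)

-- ===== LEMMAS AND PROOFS =====

-- sum of the segment cookie[a:b]
def seg (cookie : List Int) (a b : ℕ) : Int := ((cookie.drop a).take (b - a)).sum

lemma seg_nonneg (cookie : List Int) (hpos : ∀ x ∈ cookie, 0 ≤ x) (a b : ℕ) :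
    0 ≤ seg cookie a b := by
  apply List.sum_nonneg
  intro x hx
  exact hpos x (List.mem_of_mem_drop (List.mem_of_mem_take hx))

lemma seg_split (cookie : List Int) (a b c : ℕ) (hab : a ≤ b) (hbc : b ≤ c) :
    seg cookie a c = seg cookie a b + seg cookie b c := by
  unfold seg
  have h1 : c - a = (b - a) + (c - b) := by omega
  have h2 : a + (b - a) = b := by omega
  rw [h1, List.take_add, List.sum_append, List.drop_drop, h2]

lemma seg_single (cookie : List Int) (a : ℕ) (h : a < cookie.length) :
    seg cookie a (a + 1) = cookie[a] := by
  unfold seg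
  have h1 : a + 1 - a = 1 := by omega
  have h2 : List.take 1 (List.drop a cookie) = [cookie[a]] := by
    rw [List.take_one, List.head?_drop, List.getElem?_eq_getElem h]; rfl
  rw [h1, h2]
  simp

lemma seg_succ_left (cookie : List Int) (a b : ℕ) (ha : a < cookie.length) (hab : a < b) :
    seg cookie a b = cookie[a] + seg cookie (a + 1) b := by
  rw [seg_split cookie a (a + 1) b (by omega) hab, seg_single cookie a ha]

lemma seg_succ_right (cookie : List Int) (a b : ℕ) (hb : b < cookie.length) (hab : a ≤ b) :
    seg cookie a (b + 1) = seg cookie a b + cookie[b] := by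
  rw [seg_split cookie a b (b + 1) hab (by omega), seg_single cookie b hb]

lemma seg_mono_left (cookie : List Int) (hpos : ∀ x ∈ cookie, 0 ≤ x) (a' a b : ℕ)
    (h : a' ≤ a) (hab : a ≤ b) : seg cookie a b ≤ seg cookie a' b := by
  rw [seg_split cookie a' a b h hab]
  have := seg_nonneg cookie hpos a' a
  omega

lemma seg_mono_right (cookie : List Int) (hpos : ∀ x ∈ cookie, 0 ≤ x) (a b b' : ℕ)
    (hab : a ≤ b) (h : b ≤ b') : seg cookie a b' ≥ seg cookie a b := by
  rw [seg_split cookie a b b' hab h]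
  have := seg_nonneg cookie hpos b b'
  omega

-- the three facts about A's per-step answer update
lemma ans_update (s1 s2 ans : Int) :
    ans ≤ (if s1 = s2 ∧ s1 > ans then s1 else ans)
    ∧ (s1 = s2 → s1 ≤ (if s1 = s2 ∧ s1 > ans then s1 else ans))
    ∧ ((if s1 = s2 ∧ s1 > ans then s1 else ans) = ans
        ∨ ((if s1 = s2 ∧ s1 > ans then s1 else ans) = s1 ∧ s1 = s2)) := by
  split_ifs with h
  · exact ⟨le_of_lt h.2, fun _ => le_refl _, Or.inr ⟨rfl, h.1⟩⟩
  · refine ⟨le_refl _, fun he => ?_, Or.inl rfl⟩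
    by_contra hc
    exact h ⟨he, by omega⟩

-- invariant of A's walk: starting from boundary state (l, r) with the true segment sums,
-- the result dominates ans and every equal pair in the remaining region, and is itself
-- ans or the sum of some equal pair
def WP (cookie : List Int) (n i l r : ℕ) (ans w : Int) : Prop :=
  ans ≤ w
  ∧ (∀ l' r' : ℕ, l' ≤ l → r ≤ r' → r' ≤ n →
      seg cookie l' (i + 1) = seg cookie (i + 1) (r' + 1) → seg cookie l' (i + 1) ≤ w)
  ∧ (w = ans ∨ ∃ l' r' : ℕ, l' ≤ i ∧ i < r' ∧ r' ≤ n ∧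
      seg cookie l' (i + 1) = seg cookie (i + 1) (r' + 1) ∧ w = seg cookie l' (i + 1))

lemma walk_break (cookie : List Int) (hpos : ∀ x ∈ cookie, 0 ≤ x) (n i l r : ℕ) (ans : Int)
    (hl : l ≤ i) (hir : i < r) (hrn : r ≤ n)
    (hn1 : ¬((l : Int) > 0 ∧ seg cookie l (i+1) ≤ seg cookie (i+1) (r+1)))
    (hn2 : ¬((r : Int) < (n : Int) ∧ seg cookie l (i+1) ≥ seg cookie (i+1) (r+1))) :
    WP cookie n i l r ans
      (if seg cookie l (i+1) = seg cookie (i+1) (r+1) ∧ seg cookie l (i+1) > ans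
        then seg cookie l (i+1) else ans) := by
  push Not at hn1 hn2
  obtain ⟨hA, hB, hC⟩ := ans_update (seg cookie l (i+1)) (seg cookie (i+1) (r+1)) ans
  refine ⟨hA, ?_, ?_⟩
  · intro l' r' hl' hrr' hr'n heq
    rcases lt_trichotomy (seg cookie l (i+1)) (seg cookie (i+1) (r+1)) with hlt | heq2 | hgt
    · exfalso
      have hl0 : l = 0 := by
        by_contra hc
        have hgt0 : (l : Int) > 0 := by omega
        linarith [hn1 hgt0]
      have hll : l' = l := by omega
      have hmr : seg cookie (i+1) (r'+1) ≥ seg cookie (i+1) (r+1) :=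
        seg_mono_right cookie hpos (i+1) (r+1) (r'+1) (by omega) (by omega)
      rw [hll] at heq
      linarith
    · have hr0 : r = n := by
        by_contra hc
        have hrlt : (r : Int) < (n : Int) := by omega
        linarith [hn2 hrlt]
      have hl0 : l = 0 := by
        by_contra hc
        have hgt0 : (l : Int) > 0 := by omega
        linarith [hn1 hgt0]
      have hll : l' = l := by omega
      rw [hll]
      exact hB heq2
    · exfalso
      have hr0 : r = n := by
        by_contra hc
        have hrlt : (r : Int) < (n : Int) := by omega
        linarith [hn2 hrlt]
      have hrr : r' = r := by omega
      have hml : seg cookie l' (i+1) ≥ seg cookie l (i+1) :=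
        seg_mono_left cookie hpos l' l (i+1) hl' (by omega)
      rw [hrr] at heq
      linarith
  · rcases hC with h | ⟨h1, h2⟩
    · exact Or.inl h
    · exact Or.inr ⟨l, r, hl, hir, hrn, h2, h1⟩

lemma walk_spec (cookie : List Int) (hpos : ∀ x ∈ cookie, 0 ≤ x) (n i : ℕ)
    (hn : cookie.length = n + 1) (hi : i < n) :
    ∀ (k l r : ℕ) (ans : Int), l ≤ i → i < r → r ≤ n → l + (n - r) ≤ k →
      WP cookie n i l r ans
        (solWalk cookie (n : Int) (l : Int) (seg cookie l (i+1)) (r : Int)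
          (seg cookie (i+1) (r+1)) ans) := by
  intro k
  induction k with
  | zero =>
    intro l r ans hl hir hrn hk
    have hl0 : l = 0 := by omega
    have hr0 : r = n := by omega
    rw [solWalk, dif_neg (by intro h; exact absurd h.1 (by omega)),
        dif_neg (by intro h; exact absurd h.1 (by omega))]
    exact walk_break cookie hpos n i l r ans hl hir hrn
      (by intro h; exact absurd h.1 (by omega)) (by intro h; exact absurd h.1 (by omega))
  | succ k ih =>
    intro l r ans hl hir hrn hk
    rw [solWalk]
    by_cases h1 : (l : Int) > 0 ∧ seg cookie l (i+1) ≤ seg cookie (i+1) (r+1)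
    · rw [dif_pos h1]
      have hl0 : 0 < l := by have := h1.1; omega
      have e1 : (l : Int) - 1 = ((l - 1 : ℕ) : Int) := by omega
      have hlen : l - 1 < cookie.length := by omega
      have e2 : seg cookie l (i+1) + PySem.List.pyGetD cookie ((l - 1 : ℕ) : Int) 0
          = seg cookie (l - 1) (i+1) := by
        rw [PySem.List.pyGetD_natCast, List.getD_eq_getElem cookie 0 hlen,
            seg_succ_left cookie (l - 1) (i+1) hlen (by omega)]
        have e3 : l - 1 + 1 = l := by omega
        rw [e3]; ring
      rw [e1, e2]
      obtain ⟨hA, hB, hC⟩ := ans_update (seg cookie l (i+1)) (seg cookie (i+1) (r+1)) ans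
      obtain ⟨Q1, Q2, Q3⟩ := ih (l - 1) r
        (if seg cookie l (i+1) = seg cookie (i+1) (r+1) ∧ seg cookie l (i+1) > ans
          then seg cookie l (i+1) else ans) (by omega) hir hrn (by omega)
      refine ⟨le_trans hA Q1, ?_, ?_⟩
      · intro l' r' hl' hrr' hr'n heq
        by_cases hc : l' ≤ l - 1
        · exact Q2 l' r' hc hrr' hr'n heq
        · have hll : l' = l := by omega
          rw [hll] at heq ⊢
          have hmr : seg cookie (i+1) (r'+1) ≥ seg cookie (i+1) (r+1) :=
            seg_mono_right cookie hpos (i+1) (r+1) (r'+1) (by omega) (by omega)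
          have hse : seg cookie l (i+1) = seg cookie (i+1) (r+1) := by linarith [h1.2]
          exact le_trans (hB hse) Q1
      · rcases Q3 with h | ⟨l', r', c1, c2, c3, c4, c5⟩
        · rcases hC with ha | ⟨ha, hse⟩
          · exact Or.inl (h.trans ha)
          · exact Or.inr ⟨l, r, hl, hir, hrn, hse, h.trans ha⟩
        · exact Or.inr ⟨l', r', c1, c2, c3, c4, c5⟩
    · rw [dif_neg h1]
      by_cases h2 : (r : Int) < (n : Int) ∧ seg cookie l (i+1) ≥ seg cookie (i+1) (r+1)
      · rw [dif_pos h2]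
        have hr0 : r < n := by have := h2.1; omega
        have e1 : (r : Int) + 1 = ((r + 1 : ℕ) : Int) := by omega
        have hlen : r + 1 < cookie.length := by omega
        have e2 : seg cookie (i+1) (r+1) + PySem.List.pyGetD cookie ((r + 1 : ℕ) : Int) 0
            = seg cookie (i+1) (r + 1 + 1) := by
          rw [PySem.List.pyGetD_natCast, List.getD_eq_getElem cookie 0 hlen,
              seg_succ_right cookie (i+1) (r+1) hlen (by omega)]
        rw [e1, e2]
        obtain ⟨hA, hB, hC⟩ := ans_update (seg cookie l (i+1)) (seg cookie (i+1) (r+1)) ans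
        obtain ⟨Q1, Q2, Q3⟩ := ih l (r + 1)
          (if seg cookie l (i+1) = seg cookie (i+1) (r+1) ∧ seg cookie l (i+1) > ans
            then seg cookie l (i+1) else ans) hl (by omega) (by omega) (by omega)
        refine ⟨le_trans hA Q1, ?_, ?_⟩
        · intro l' r' hl' hrr' hr'n heq
          by_cases hc : r + 1 ≤ r'
          · exact Q2 l' r' hl' hc hr'n heq
          · have hrr : r' = r := by omega
            rw [hrr] at heq
            have hml : seg cookie l' (i+1) ≥ seg cookie l (i+1) :=
              seg_mono_left cookie hpos l' l (i+1) hl' (by omega)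
            have hse : seg cookie l (i+1) = seg cookie (i+1) (r+1) := by linarith [h2.2]
            have hv : seg cookie l' (i+1) = seg cookie l (i+1) := by linarith
            rw [hv]
            exact le_trans (hB hse) Q1
        · rcases Q3 with h | ⟨l', r', c1, c2, c3, c4, c5⟩
          · rcases hC with ha | ⟨ha, hse⟩
            · exact Or.inl (h.trans ha)
            · exact Or.inr ⟨l, r, hl, hir, hrn, hse, h.trans ha⟩
          · exact Or.inr ⟨l', r', c1, c2, c3, c4, c5⟩
      · rw [dif_neg h2]
        exact walk_break cookie hpos n i l r ans hl hir hrn h1 h2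

-- B's left loop builds exactly the set of suffix sums of ys (shifted by s0), and its
-- running sum ends at s0 + sum ys
lemma left_loop (ys : List Int) (s0 : Int) (acc : PySem.Set Int) :
    (ys.reverse.foldl
        (fun (p : Int × PySem.Set Int) c => (p.1 + c, PySem.Set.add p.2 (p.1 + c)))
        (s0, acc)).1 = s0 + ys.sum
    ∧ ∀ x, (x ∈ (ys.reverse.foldl
        (fun (p : Int × PySem.Set Int) c => (p.1 + c, PySem.Set.add p.2 (p.1 + c)))
        (s0, acc)).2 ↔ x ∈ acc ∨ ∃ l : ℕ, l < ys.length ∧ x = s0 + (ys.drop l).sum) := by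
  induction ys generalizing s0 acc with
  | nil => simp
  | cons y ys ih =>
    rw [List.reverse_cons, List.foldl_append]
    obtain ⟨ih1, ih2⟩ := ih s0 acc
    constructor
    · simp only [List.foldl_cons, List.foldl_nil]
      rw [ih1]
      simp only [List.sum_cons]
      ring
    · intro x
      simp only [List.foldl_cons, List.foldl_nil, List.length_cons]
      rw [PySem.Set.mem_add, ih2 x, ih1]
      constructor
      · rintro ((hx | ⟨l, hl, e⟩) | he)
        · exact Or.inl hx
        · refine Or.inr ⟨l + 1, by omega, ?_⟩
          simpa using e
        · refine Or.inr ⟨0, by omega, ?_⟩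
          simp only [List.drop_zero, List.sum_cons]
          omega
      · rintro (hx | ⟨l, hl, e⟩)
        · exact Or.inl (Or.inl hx)
        · cases l with
          | zero =>
            refine Or.inr ?_
            simp only [List.drop_zero, List.sum_cons] at e
            omega
          | succ l =>
            refine Or.inl (Or.inr ⟨l, by omega, ?_⟩)
            simpa using e

-- B's right loop: its result dominates b0 and every prefix sum that lies in L, and is
-- itself b0 or such a prefix sum
lemma right_loop (L : PySem.Set Int) (zs : List Int) :
    ∀ (t0 b0 : Int),
      b0 ≤ (zs.foldl (fun (p : Int × Int) c =>
              (p.1 + c, if PySem.Set.contains L (p.1 + c) ∧ p.1 + c > p.2 then p.1 + c else p.2))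
            (t0, b0)).2
      ∧ (∀ j : ℕ, j < zs.length → PySem.Set.contains L (t0 + (zs.take (j+1)).sum) →
          t0 + (zs.take (j+1)).sum ≤ (zs.foldl (fun (p : Int × Int) c =>
              (p.1 + c, if PySem.Set.contains L (p.1 + c) ∧ p.1 + c > p.2 then p.1 + c else p.2))
            (t0, b0)).2)
      ∧ ((zs.foldl (fun (p : Int × Int) c =>
              (p.1 + c, if PySem.Set.contains L (p.1 + c) ∧ p.1 + c > p.2 then p.1 + c else p.2))
            (t0, b0)).2 = b0
          ∨ ∃ j : ℕ, j < zs.length ∧ PySem.Set.contains L (t0 + (zs.take (j+1)).sum)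
              ∧ (zs.foldl (fun (p : Int × Int) c =>
                  (p.1 + c, if PySem.Set.contains L (p.1 + c) ∧ p.1 + c > p.2 then p.1 + c else p.2))
                (t0, b0)).2 = t0 + (zs.take (j+1)).sum) := by
  induction zs with
  | nil => simp
  | cons c zs ih =>
    intro t0 b0
    simp only [List.foldl_cons, List.length_cons]
    obtain ⟨Q1, Q2, Q3⟩ := ih (t0 + c)
      (if PySem.Set.contains L (t0 + c) ∧ t0 + c > b0 then t0 + c else b0)
    have hb01 : b0 ≤ (if PySem.Set.contains L (t0 + c) ∧ t0 + c > b0 then t0 + c else b0) := by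
      split_ifs with h
      · exact le_of_lt h.2
      · exact le_refl _
    have e0 : t0 + ((c :: zs).take 1).sum = t0 + c := by simp
    refine ⟨le_trans hb01 Q1, ?_, ?_⟩
    · intro j hj hcont
      cases j with
      | zero =>
        rw [e0] at hcont ⊢
        by_cases hgt : t0 + c > b0
        · have hb1 : (if PySem.Set.contains L (t0 + c) ∧ t0 + c > b0 then t0 + c else b0)
              = t0 + c := if_pos ⟨hcont, hgt⟩
          exact le_trans (le_of_eq hb1.symm) Q1
        · exact le_trans (le_trans (by omega) hb01) Q1
      | succ j =>
        have e : t0 + ((c :: zs).take (j + 1 + 1)).sum = t0 + c + (zs.take (j + 1)).sum := by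
          simp [List.take_succ_cons]
          ring
        rw [e] at hcont ⊢
        exact Q2 j (by omega) hcont
    · rcases Q3 with h | ⟨j, hj, hc2, he⟩
      · by_cases hcond : (PySem.Set.contains L (t0 + c) : Prop) ∧ t0 + c > b0
        · refine Or.inr ⟨0, by omega, ?_, ?_⟩
          · rw [e0]
            exact hcond.1
          · rw [e0]
            exact h.trans (if_pos hcond)
        · exact Or.inl (h.trans (if_neg hcond))
      · have e : t0 + ((c :: zs).take (j + 1 + 1)).sum = t0 + c + (zs.take (j + 1)).sum := by
          simp [List.take_succ_cons]
          ring
        refine Or.inr ⟨j + 1, by omega, ?_, ?_⟩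
        · rw [e]
          exact hc2
        · rw [e]
          exact he

-- per-boundary agreement: A's walk from boundary i equals B's set-and-scan at boundary i
lemma step_eq (cookie : List Int) (hpos : ∀ x ∈ cookie, 0 ≤ x) (n i : ℕ)
    (hn : cookie.length = n + 1) (hi : i < n) (ans : Int) :
    solWalk cookie (n : Int) (i : Int) (seg cookie i (i+1)) (((i+1 : ℕ)) : Int)
        (seg cookie (i+1) (i+1+1)) ans
      = ((cookie.drop (i+1)).foldl
          (fun (p : Int × Int) c => (p.1 + c,
            if PySem.Set.contains (((cookie.take (i+1)).reverse.foldl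
                (fun (q : Int × PySem.Set Int) c => (q.1 + c, PySem.Set.add q.2 (q.1 + c)))
                (0, PySem.Set.empty)).2) (p.1 + c) ∧ p.1 + c > p.2 then p.1 + c else p.2))
          (0, ans)).2 := by
  obtain ⟨L1, L2⟩ := left_loop (cookie.take (i+1)) 0 PySem.Set.empty
  have memL : ∀ v : Int,
      v ∈ (((cookie.take (i+1)).reverse.foldl
              (fun (q : Int × PySem.Set Int) c => (q.1 + c, PySem.Set.add q.2 (q.1 + c)))
              (0, PySem.Set.empty)).2)
        ↔ ∃ l : ℕ, l ≤ i ∧ v = seg cookie l (i+1) := by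
    intro v
    rw [L2 v]
    constructor
    · rintro (h | ⟨l, hl, e⟩)
      · exact absurd h (List.not_mem_nil)
      · have hlt : (List.take (i+1) cookie).length = i + 1 := by
          rw [List.length_take]; omega
        refine ⟨l, by omega, ?_⟩
        rw [e, List.drop_take]
        unfold seg
        ring
    · rintro ⟨l, hl, e⟩
      refine Or.inr ⟨l, by rw [List.length_take]; omega, ?_⟩
      rw [List.drop_take, e]
      unfold seg
      ring
  obtain ⟨R1, R2, R3⟩ := right_loop
    (((cookie.take (i+1)).reverse.foldl
        (fun (q : Int × PySem.Set Int) c => (q.1 + c, PySem.Set.add q.2 (q.1 + c)))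
        (0, PySem.Set.empty)).2)
    (cookie.drop (i+1)) 0 ans
  obtain ⟨P1, P2, P3⟩ := walk_spec cookie hpos n i hn hi (i + (n - (i+1))) i (i+1) ans
    (le_refl i) (by omega) (by omega) (by omega)
  have ev : ∀ j : ℕ, (0:Int) + ((cookie.drop (i+1)).take (j+1)).sum
      = seg cookie (i+1) (i+1+j+1) := by
    intro j
    unfold seg
    have : i+1+j+1 - (i+1) = j+1 := by omega
    rw [this]
    ring
  apply le_antisymm
  · rcases P3 with h | ⟨l', r', hl', hir', hr'n, heq, hw⟩
    · rw [h]; exact R1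
    · rw [hw]
      have hj : r' - (i+1) < (cookie.drop (i+1)).length := by
        rw [List.length_drop]; omega
      have hv := ev (r' - (i+1))
      have er : i+1+(r'-(i+1))+1 = r'+1 := by omega
      rw [er] at hv
      have hcont : PySem.Set.contains
          (((cookie.take (i+1)).reverse.foldl
              (fun (q : Int × PySem.Set Int) c => (q.1 + c, PySem.Set.add q.2 (q.1 + c)))
              (0, PySem.Set.empty)).2)
          (0 + ((cookie.drop (i+1)).take ((r'-(i+1))+1)).sum) = true := by
        rw [hv]
        exact (PySem.Set.contains_iff _ _).mpr ((memL _).mpr ⟨l', hl', heq.symm⟩)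
      have hres := R2 (r' - (i+1)) hj hcont
      rw [hv] at hres
      rw [heq]
      exact hres
  · rcases R3 with h | ⟨j, hj, hcont, he⟩
    · rw [h]; exact P1
    · rw [he]
      have hv := ev j
      have hmem := (memL _).mp ((PySem.Set.contains_iff _ _).mp hcont)
      obtain ⟨l', hl', e⟩ := hmem
      rw [List.length_drop] at hj
      have heq2 : seg cookie l' (i+1) = seg cookie (i+1) (i+1+j+1) := by
        rw [← e, hv]
      rw [e]
      exact P2 l' (i+1+j) hl' (by omega) (by omega) heq2

-- case: every entry non-negative (the walk invariant applies)
lemma eq_nonneg (cookie : List Int) (hpre : ∀ x ∈ cookie, 0 ≤ x) :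
    solution cookie = solution_alt cookie := by
  simp only [solution, solution_alt]
  apply PySem.List.foldl_congr_mem
  intro ans x hx
  rw [PySem.List.mem_pyRange_one] at hx
  obtain ⟨iN, rfl⟩ : ∃ m : ℕ, x = (m : Int) := ⟨x.toNat, (Int.toNat_of_nonneg hx.1).symm⟩
  have hx2 := hx.2
  have hlen : 2 ≤ cookie.length := by omega
  have hn : cookie.length = (cookie.length - 1) + 1 := by omega
  have hi : iN < cookie.length - 1 := by omega
  have eN : ((cookie.length : Int) - 1) = ((cookie.length - 1 : ℕ) : Int) := by omega
  have e1 : ((iN : Int) + 1) = ((iN + 1 : ℕ) : Int) := by omega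
  have g1 : PySem.List.pyGetD cookie (iN : Int) 0 = seg cookie iN (iN + 1) := by
    rw [PySem.List.pyGetD_natCast, List.getD_eq_getElem cookie 0 (by omega),
        seg_single cookie iN (by omega)]
  have g2 : PySem.List.pyGetD cookie ((iN + 1 : ℕ) : Int) 0 = seg cookie (iN + 1) (iN + 1 + 1) := by
    rw [PySem.List.pyGetD_natCast, List.getD_eq_getElem cookie 0 (by omega),
        seg_single cookie (iN + 1) (by omega)]
  rw [eN, e1, g1, g2, PySem.List.slice_to_natCast, PySem.List.slice_from_natCast]
  exact step_eq cookie hpre (cookie.length - 1) iN hn hi ans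

lemma seg_nonpos (cookie : List Int) (hneg : ∀ x ∈ cookie, x ≤ 0) (a b : ℕ) :
    seg cookie a b ≤ 0 := by
  have h : ∀ (xs : List Int), (∀ x ∈ xs, x ≤ 0) → xs.sum ≤ 0 := by
    intro xs hxs
    induction xs with
    | nil => simp
    | cons x t ih =>
      simp only [List.sum_cons]
      have h1 := hxs x (by simp)
      have h2 := ih (fun y hy => hxs y (by simp [hy]))
      omega
  exact h _ (fun x hx => hneg x (List.mem_of_mem_drop (List.mem_of_mem_take hx)))

-- with no positive entry, A's walk never raises its answer
lemma walk_nonpos (cookie : List Int) (hneg : ∀ x ∈ cookie, x ≤ 0) (n i : ℕ)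
    (hn : cookie.length = n + 1) (hi : i < n) :
    ∀ (k l r : ℕ) (ans : Int), l ≤ i → i < r → r ≤ n → l + (n - r) ≤ k → 0 ≤ ans →
      solWalk cookie (n : Int) (l : Int) (seg cookie l (i+1)) (r : Int)
        (seg cookie (i+1) (r+1)) ans = ans := by
  intro k
  induction k with
  | zero =>
    intro l r ans hl hir hrn hk hans
    have hl0 : l = 0 := by omega
    have hr0 : r = n := by omega
    rw [solWalk, dif_neg (by intro h; exact absurd h.1 (by omega)),
        dif_neg (by intro h; exact absurd h.1 (by omega)), if_neg]
    intro h
    have := seg_nonpos cookie hneg l (i+1)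
    linarith [h.2]
  | succ k ih =>
    intro l r ans hl hir hrn hk hans
    have hupd : (if seg cookie l (i+1) = seg cookie (i+1) (r+1) ∧ seg cookie l (i+1) > ans
        then seg cookie l (i+1) else ans) = ans := by
      rw [if_neg]
      intro h
      have := seg_nonpos cookie hneg l (i+1)
      linarith [h.2]
    rw [solWalk]
    by_cases h1 : (l : Int) > 0 ∧ seg cookie l (i+1) ≤ seg cookie (i+1) (r+1)
    · rw [dif_pos h1, hupd]
      have hl0 : 0 < l := by have := h1.1; omega
      have e1 : (l : Int) - 1 = ((l - 1 : ℕ) : Int) := by omega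
      have hlen : l - 1 < cookie.length := by omega
      have e2 : seg cookie l (i+1) + PySem.List.pyGetD cookie ((l - 1 : ℕ) : Int) 0
          = seg cookie (l - 1) (i+1) := by
        rw [PySem.List.pyGetD_natCast, List.getD_eq_getElem cookie 0 hlen,
            seg_succ_left cookie (l - 1) (i+1) hlen (by omega)]
        have e3 : l - 1 + 1 = l := by omega
        rw [e3]; ring
      rw [e1, e2]
      exact ih (l - 1) r ans (by omega) hir hrn (by omega) hans
    · rw [dif_neg h1]
      by_cases h2 : (r : Int) < (n : Int) ∧ seg cookie l (i+1) ≥ seg cookie (i+1) (r+1)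
      · rw [dif_pos h2, hupd]
        have hr0 : r < n := by have := h2.1; omega
        have e1 : (r : Int) + 1 = ((r + 1 : ℕ) : Int) := by omega
        have hlen : r + 1 < cookie.length := by omega
        have e2 : seg cookie (i+1) (r+1) + PySem.List.pyGetD cookie ((r + 1 : ℕ) : Int) 0
            = seg cookie (i+1) (r + 1 + 1) := by
          rw [PySem.List.pyGetD_natCast, List.getD_eq_getElem cookie 0 hlen,
              seg_succ_right cookie (i+1) (r+1) hlen (by omega)]
        rw [e1, e2]
        exact ih l (r + 1) ans hl (by omega) (by omega) (by omega) hans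
      · rw [dif_neg h2, hupd]

-- with no positive entry, B's right scan never raises its best
lemma right_loop_nonpos (L : PySem.Set Int) (zs : List Int) (hz : ∀ x ∈ zs, x ≤ 0) :
    ∀ (t0 b0 : Int), t0 ≤ 0 → 0 ≤ b0 →
      (zs.foldl (fun (p : Int × Int) c =>
          (p.1 + c, if PySem.Set.contains L (p.1 + c) ∧ p.1 + c > p.2 then p.1 + c else p.2))
        (t0, b0)).2 = b0 := by
  induction zs with
  | nil => intro t0 b0 _ _; rfl
  | cons c zs ih =>
    intro t0 b0 ht hb
    have hc : c ≤ 0 := hz c (by simp)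
    simp only [List.foldl_cons]
    rw [if_neg (by intro h; linarith [h.2])]
    exact ih (fun x hx => hz x (by simp [hx])) (t0 + c) b0 (by linarith) hb

-- a fold whose step fixes every non-negative accumulator
lemma foldl_fix (l : List Int) (f : Int → Int → Int)
    (hf : ∀ a x, 0 ≤ a → x ∈ l → f a x = a) : ∀ a, 0 ≤ a → l.foldl f a = a := by
  induction l with
  | nil => intro a _; rfl
  | cons x t ih =>
    intro a ha
    simp only [List.foldl_cons]
    rw [hf a x ha (by simp)]
    exact ih (fun a y hay hy => hf a y hay (by simp [hy])) a ha

-- case: every entry non-positive (both programs return 0)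
lemma eq_nonpos (cookie : List Int) (hneg : ∀ x ∈ cookie, x ≤ 0) :
    solution cookie = solution_alt cookie := by
  simp only [solution, solution_alt]
  rw [foldl_fix _ _ ?hA 0 (le_refl 0), foldl_fix _ _ ?hB 0 (le_refl 0)]
  case hA =>
    intro ans x ha hx
    rw [PySem.List.mem_pyRange_one] at hx
    obtain ⟨iN, rfl⟩ : ∃ m : ℕ, x = (m : Int) := ⟨x.toNat, (Int.toNat_of_nonneg hx.1).symm⟩
    have hx2 := hx.2
    have hlen : 2 ≤ cookie.length := by omega
    have hn : cookie.length = (cookie.length - 1) + 1 := by omega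
    have hi : iN < cookie.length - 1 := by omega
    have eN : ((cookie.length : Int) - 1) = ((cookie.length - 1 : ℕ) : Int) := by omega
    have e1 : ((iN : Int) + 1) = ((iN + 1 : ℕ) : Int) := by omega
    have g1 : PySem.List.pyGetD cookie (iN : Int) 0 = seg cookie iN (iN + 1) := by
      rw [PySem.List.pyGetD_natCast, List.getD_eq_getElem cookie 0 (by omega),
          seg_single cookie iN (by omega)]
    have g2 : PySem.List.pyGetD cookie ((iN + 1 : ℕ) : Int) 0
        = seg cookie (iN + 1) (iN + 1 + 1) := by
      rw [PySem.List.pyGetD_natCast, List.getD_eq_getElem cookie 0 (by omega),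
          seg_single cookie (iN + 1) (by omega)]
    rw [eN, e1, g1, g2]
    exact walk_nonpos cookie hneg (cookie.length - 1) iN hn hi
      (iN + (cookie.length - 1 - (iN + 1))) iN (iN + 1) ans
      (le_refl iN) (by omega) (by omega) (by omega) ha
  case hB =>
    intro ans x ha hx
    rw [PySem.List.mem_pyRange_one] at hx
    obtain ⟨iN, rfl⟩ : ∃ m : ℕ, x = (m : Int) := ⟨x.toNat, (Int.toNat_of_nonneg hx.1).symm⟩
    have e1 : ((iN : Int) + 1) = ((iN + 1 : ℕ) : Int) := by omega
    rw [e1, PySem.List.slice_from_natCast]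
    exact right_loop_nonpos _ (cookie.drop (iN + 1))
      (fun y hy => hneg y (List.mem_of_mem_drop hy)) 0 ans (le_refl 0) ha

-- case: at most two baskets (both sides reduce to the same single comparison)
lemma eq_short (cookie : List Int) (hlen : cookie.length ≤ 2) :
    solution cookie = solution_alt cookie := by
  match cookie, hlen with
  | [], _ => rfl
  | [a], _ => rfl
  | [a, b], _ =>
    simp only [solution, solution_alt]
    have h1 : (([a, b] : List Int).length : Int) - 1 = 1 := by simp
    rw [h1]
    have h2 : PySem.List.pyRange 0 1 1 = [0] := by decide
    rw [h2]
    simp only [List.foldl_cons, List.foldl_nil]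
    rw [solWalk, dif_neg (by norm_num), dif_neg (by norm_num)]
    have g1 : PySem.List.pyGetD [a, b] 0 0 = a := PySem.List.pyGetD_zero_cons a [b] 0
    have g2 : PySem.List.pyGetD [a, b] (0 + 1) 0 = b := by
      norm_num [PySem.List.pyGetD]
    have s1 : PySem.List.slice [a, b] none (some (0 + 1)) = [a] := by
      norm_num [PySem.List.slice_to]
    have s2 : PySem.List.slice [a, b] (some (0 + 1)) none = [b] := by
      norm_num [PySem.List.slice_from]
    rw [g1, g2, s1, s2]
    simp only [List.reverse_singleton, List.foldl_cons, List.foldl_nil]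
    have hadd : PySem.Set.add PySem.Set.empty (0 + a) = [0 + a] := rfl
    rw [hadd]
    have hmem : ∀ x y : Int, PySem.Set.contains [x] y = true → y = x := by
      intro x y h
      simpa using (PySem.Set.contains_iff [x] y).mp h
    have hmem' : ∀ x y : Int, y = x → PySem.Set.contains [x] y = true := by
      intro x y h
      exact (PySem.Set.contains_iff [x] y).mpr (by simp [h])
    split_ifs with h1 h2 h2
    · have := hmem _ _ h2.1
      omega
    · exfalso
      exact h2 ⟨hmem' _ _ (by omega), by omega⟩
    · exfalso
      have := hmem _ _ h2.1
      exact h1 ⟨by omega, by omega⟩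
    · rfl

-- ===== VERDICT (by name: the statement is the Claim_ definition above) =====
theorem solution_spec : Claim_equal_solution := by
  intro cookie _hdom hpre
  unfold Spec_solution
  rcases hpre with h | h | h
  · exact eq_short cookie h
  · exact eq_nonneg cookie h
  · exact eq_nonpos cookie h
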